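-- pv_equiv track=rewrite | github.com/shree-elamathi/python-programs | geeksforgeeks/facing_the_sun.py | countBuildings
-- ===== SOURCE A (Python) =====
-- def countBuildings(height):
--     max_height=height[0]
--     c=1
--     for i in height:
--         if i>max_height:
--             max_height=i
--             c+=1
--     return c
-- ===== SOURCE B (Python) =====
-- def countBuildings(height):
--     # two passes: build the prefix-maximum table, then count its distinct values
--     pref = []
--     for h in height:
--         pref.append(h if not pref or h > pref[-1] else pref[-1])
--     return len(set(pref))
-- ===== Notes on version B (the rewrite author's own statement) =====
-- stated objective: alternative
-- what changed: B builds the prefix-maximum table in a first pass and then counts the number of distinct values in that table with set(), instead of A's single fused loop that maintains a running max and a counter.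
-- crash fix: On the empty list A raises IndexError (it reads height[0]); B returns 0, the number of visible buildings among none. — e.g. on countBuildings([]): A raises IndexError, B returns 0
import Mathlib
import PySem

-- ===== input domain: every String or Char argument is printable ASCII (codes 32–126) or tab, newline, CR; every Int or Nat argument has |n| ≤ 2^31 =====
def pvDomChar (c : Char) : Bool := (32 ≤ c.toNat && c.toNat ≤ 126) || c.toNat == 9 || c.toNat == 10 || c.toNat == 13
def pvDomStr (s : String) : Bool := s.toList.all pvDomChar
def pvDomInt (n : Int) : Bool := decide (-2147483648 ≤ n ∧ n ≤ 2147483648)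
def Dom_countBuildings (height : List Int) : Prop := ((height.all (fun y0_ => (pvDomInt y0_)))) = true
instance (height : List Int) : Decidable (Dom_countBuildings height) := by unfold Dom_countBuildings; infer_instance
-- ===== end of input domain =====

-- B replaces A's fused running-max-and-counter loop by a prefix-maximum table pass followed by a distinct-count (alternative decomposition, same cost).


-- ===== PORT A =====
-- the for-loop over height with state (max_height, c)
def pvALoop (m c : Int) (hs : List Int) : Int × Int :=
  match hs with
  | [] => (m, c)
  | i :: t => if i > m then pvALoop i (c + 1) t else pvALoop m c t

def countBuildings (height : List Int) : Int :=
  match height with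
  | [] => 0  -- unreachable under Pre_: Python raises IndexError on height[0]
  | h0 :: _ => (pvALoop h0 1 height).2

-- ===== PORT B =====
-- the for-loop building pref: pref.append(h if not pref or h > pref[-1] else pref[-1])
def pvBLoop (pref : List Int) (hs : List Int) : List Int :=
  match hs with
  | [] => pref
  | h :: t =>
      pvBLoop (pref ++ [match pref.getLast? with
                        | none => h
                        | some m => if h > m then h else m]) t

def countBuildings_alt (height : List Int) : Int :=
  ((PySem.Set.ofList (pvBLoop [] height)).length : Int)

-- ===== PRECONDITION & SPEC =====
-- Pre_ excludes exactly the empty list, on which A raises IndexError (height[0]).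
def Pre_countBuildings (height : List Int) : Prop := height ≠ []
instance (height : List Int) : Decidable (Pre_countBuildings height) := by unfold Pre_countBuildings; infer_instance
def pvWitness_countBuildings : List Int := ([3, 1, 4])

-- On the empty list A raises IndexError (it reads height[0]); B returns 0.
def Raises_countBuildings (height : List Int) : Prop := height = []
instance (height : List Int) : Decidable (Raises_countBuildings height) := by unfold Raises_countBuildings; infer_instance
def pvRaiseWitness_countBuildings : List Int := ([])
def pvRaiseWitnessOut_countBuildings : Int := 0

def Spec_countBuildings (height : List Int) (out : Int) : Prop := out = countBuildings_alt height
instance (height : List Int) (out : Int) : Decidable (Spec_countBuildings height out) := by unfold Spec_countBuildings; infer_instance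

-- ===== CLAIM (what is proved, stated in full; the proofs are below) =====
def Claim_equal_countBuildings : Prop := ∀ (height : List Int), Dom_countBuildings height → Pre_countBuildings height → Spec_countBuildings height (countBuildings height)
def Claim_raises_countBuildings : Prop := (∀ (height : List Int), Dom_countBuildings height → Raises_countBuildings height → ¬ Pre_countBuildings height) ∧ (Dom_countBuildings (pvRaiseWitness_countBuildings) ∧ Raises_countBuildings (pvRaiseWitness_countBuildings) ∧ countBuildings_alt (pvRaiseWitness_countBuildings) = pvRaiseWitnessOut_countBuildings)

-- ===== LEMMAS AND PROOFS =====

-- the prefix-maximum sequence continuing from running max m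
def pvScan (m : Int) : List Int → List Int
  | [] => []
  | h :: t => (if h > m then h else m) :: pvScan (if h > m then h else m) t

theorem pvScan_ge (hs : List Int) (m x : Int) (hx : x ∈ pvScan m hs) : m ≤ x := by
  induction hs generalizing m with
  | nil => simp [pvScan] at hx
  | cons h t ih =>
      simp only [pvScan, List.mem_cons] at hx
      rcases hx with rfl | hx
      · split <;> omega
      · have := ih _ hx
        split at this <;> omega

theorem pvBLoop_eq (hs : List Int) (pref : List Int) (m : Int)
    (hlast : pref.getLast? = some m) : pvBLoop pref hs = pref ++ pvScan m hs := by
  induction hs generalizing pref m with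
  | nil => simp [pvBLoop, pvScan]
  | cons h t ih =>
      simp only [pvBLoop, hlast, pvScan]
      rw [ih (pref ++ [if h > m then h else m]) (if h > m then h else m)
            (by simp)]
      simp

theorem pvALoop_card (hs : List Int) (m c : Int) :
    (pvALoop m c hs).2 = c + ((insert m (pvScan m hs).toFinset).card : Int) - 1 := by
  induction hs generalizing m c with
  | nil => simp [pvALoop, pvScan]
  | cons h t ih =>
      simp only [pvALoop, pvScan]
      split
      · next hgt =>
        rw [ih]
        have hnm : m ∉ insert h (pvScan h t).toFinset := by
          simp only [Finset.mem_insert, List.mem_toFinset]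
          rintro (rfl | hx)
          · omega
          · have := pvScan_ge t h m hx; omega
        rw [List.toFinset_cons, Finset.card_insert_of_notMem hnm]
        push_cast
        ring
      · next hgt =>
        rw [ih]
        congr 2
        simp

theorem pvSet_len (xs : List Int) : (PySem.Set.ofList xs).length = xs.toFinset.card := by
  have hmem : (PySem.Set.ofList xs).toFinset = xs.toFinset := by
    ext x; simp [List.mem_toFinset, PySem.Set.mem_ofList]
  rw [← hmem, List.toFinset_card_of_nodup (PySem.Set.nodup_ofList xs)]

-- ===== VERDICT (by name: the statement is the Claim_ definition above) =====
theorem countBuildings_spec : Claim_equal_countBuildings := by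
  intro height _ hpre
  unfold Spec_countBuildings
  match height with
  | [] => exact absurd rfl hpre
  | h0 :: t =>
      unfold countBuildings countBuildings_alt
      rw [show pvBLoop [] (h0 :: t) = [h0] ++ pvScan h0 t by
            simp only [pvBLoop]
            exact pvBLoop_eq t [h0] h0 rfl]
      have hstep : pvALoop h0 1 (h0 :: t) = pvALoop h0 1 t := by
        simp [pvALoop]
      change (pvALoop h0 1 (h0 :: t)).2 = _
      rw [hstep, pvALoop_card, pvSet_len]
      have : ([h0] ++ pvScan h0 t).toFinset = insert h0 (pvScan h0 t).toFinset := by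
        simp
      rw [this]
      ring

@[simp] theorem countBuildings_raises : Claim_raises_countBuildings := by
  unfold Claim_raises_countBuildings
  exact ⟨fun h _ hr hp => hp hr, by decide⟩
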